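-- pv_equiv track=rewrite | github.com/lmoffett/cloze-or-close | clz_or_cls/recovery.py | flatten_list_of_lists
-- ===== SOURCE A (Python) =====
-- def flatten_list_of_lists(list_of_lists):
--     """
--     Flattens a list of lists into a single list and returns a dictionary
--     with positional mappings to reconstruct the original list of lists.
--
--     :param list_of_lists: List of lists to be flattened
--     :return: Tuple of flattened list and dictionary of mappings
--     """
--     flattened_list = []
--     mappings = {}
--     start_pos = 0
--
--     for sublist in list_of_lists:
--         # Record the start and end positions of the current sublist
--         end_pos = start_pos + len(sublist)
--         mappings[start_pos] = end_pos
--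
--         # Extend the flattened list with the current sublist
--         flattened_list.extend(sublist)
--
--         # Update the start position for the next sublist
--         start_pos = end_pos
--
--     return flattened_list, mappings
-- ===== SOURCE B (Python) =====
-- def flatten_list_of_lists(list_of_lists):
--     flattened = [x for sub in list_of_lists for x in sub]
--     ends = []
--     total = 0
--     for n in map(len, list_of_lists):
--         total += n
--         ends.append(total)
--     starts = [0] + ends[:-1]
--     mappings = dict(zip(starts, ends))
--     return flattened, mappings
-- ===== Notes on version B (the rewrite author's own statement) =====
-- stated objective: alternative
-- what changed: A builds the flat list and the start->end dict together in one stateful loop; B flattens with a comprehension and separately derives cumulative end positions from the sublist lengths, pairing shifted starts with ends via dict(zip(...)).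
import Mathlib
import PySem

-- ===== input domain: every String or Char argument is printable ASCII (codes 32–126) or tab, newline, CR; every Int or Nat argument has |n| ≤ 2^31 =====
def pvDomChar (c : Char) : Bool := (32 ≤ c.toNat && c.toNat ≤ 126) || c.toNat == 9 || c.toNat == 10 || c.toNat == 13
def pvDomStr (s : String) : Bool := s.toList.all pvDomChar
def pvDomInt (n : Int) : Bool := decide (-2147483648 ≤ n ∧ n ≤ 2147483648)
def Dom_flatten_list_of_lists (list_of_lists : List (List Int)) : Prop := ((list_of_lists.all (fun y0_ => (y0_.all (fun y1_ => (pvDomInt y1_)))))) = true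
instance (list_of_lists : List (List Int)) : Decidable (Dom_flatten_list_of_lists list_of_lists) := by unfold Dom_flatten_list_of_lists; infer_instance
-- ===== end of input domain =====

-- B flattens with a comprehension and builds the start->end dict from cumulative length prefix sums via dict(zip(starts, ends)), instead of A's single stateful loop; alternative decomposition, same cost.


-- ===== PORT A =====
def flatten_list_of_lists (list_of_lists : List (List Int)) : List Int × (List (Int × Int)) :=
  -- flattened_list = []; mappings = {}; start_pos = 0
  -- for sublist in list_of_lists: end_pos = start_pos + len(sublist); mappings[start_pos] = end_pos;
  --   flattened_list.extend(sublist); start_pos = end_pos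
  let st := list_of_lists.foldl
    (fun (s : List Int × PySem.Dict Int Int × Int) sublist =>
      let end_pos : Int := s.2.2 + (sublist.length : Int)
      (s.1 ++ sublist, s.2.1.insert s.2.2 end_pos, end_pos))
    ([], PySem.Dict.empty, 0)
  (st.1, st.2.1.items)

-- ===== PORT B =====
def flatten_list_of_lists_alt (list_of_lists : List (List Int)) : List Int × (List (Int × Int)) :=
  -- flattened = [x for sub in list_of_lists for x in sub]
  let flattened := list_of_lists.flatMap (fun sub => sub)
  -- ends = []; total = 0
  -- for n in map(len, list_of_lists): total += n; ends.append(total)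
  let p := (list_of_lists.map (fun sub => (sub.length : Int))).foldl
    (fun (s : List Int × Int) n => (s.1 ++ [s.2 + n], s.2 + n)) ([], 0)
  let ends := p.1
  -- starts = [0] + ends[:-1]   (ends[:-1] of a plain list = dropLast, exact)
  let starts := 0 :: ends.dropLast
  -- mappings = dict(zip(starts, ends))
  let mappings := PySem.Dict.ofList (starts.zip ends)
  (flattened, mappings.items)

-- ===== PRECONDITION & SPEC =====
def Spec_flatten_list_of_lists (list_of_lists : List (List Int)) (out : List Int × (List (Int × Int))) : Prop := out = flatten_list_of_lists_alt list_of_lists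
instance (list_of_lists : List (List Int)) (out : List Int × (List (Int × Int))) : Decidable (Spec_flatten_list_of_lists list_of_lists out) := by unfold Spec_flatten_list_of_lists; infer_instance

-- ===== CLAIM (what is proved, stated in full; the proofs are below) =====
def Claim_equal_flatten_list_of_lists : Prop := ∀ (list_of_lists : List (List Int)), Dom_flatten_list_of_lists list_of_lists → Spec_flatten_list_of_lists list_of_lists (flatten_list_of_lists list_of_lists)

-- ===== LEMMAS AND PROOFS =====

-- cumulative end positions of the length list, starting from running total t
def pvEnds (t : Int) : List Int → List Int
  | [] => []
  | n :: ns => (t + n) :: pvEnds (t + n) ns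

-- (start, end) pairs of the length list, starting at position t
def pvPairs (t : Int) : List Int → List (Int × Int)
  | [] => []
  | n :: ns => (t, t + n) :: pvPairs (t + n) ns

theorem pvEnds_ne_nil (t : Int) (n : Int) (ns : List Int) : pvEnds t (n :: ns) ≠ [] := by
  simp [pvEnds]

theorem zip_ends_eq_pairs (ls : List Int) (t : Int) :
    ((t :: (pvEnds t ls).dropLast).zip (pvEnds t ls)) = pvPairs t ls := by
  induction ls generalizing t with
  | nil => simp [pvEnds, pvPairs]
  | cons n ns ih =>
    cases ns with
    | nil => simp [pvEnds, pvPairs]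
    | cons m ms =>
      have h := pvEnds_ne_nil (t + n) m ms
      have := ih (t + n)
      simp only [pvEnds, pvPairs] at *
      simp [List.dropLast_cons_of_ne_nil h, this]

theorem foldl_ends (ls : List Int) (acc : List Int) (t : Int) :
    ls.foldl (fun (s : List Int × Int) n => (s.1 ++ [s.2 + n], s.2 + n)) (acc, t)
      = (acc ++ pvEnds t ls, t + ls.sum) := by
  induction ls generalizing acc t with
  | nil => simp [pvEnds]
  | cons n ns ih => simp [pvEnds, ih, List.append_assoc]; ring

theorem foldl_A (xs : List (List Int)) (fl : List Int) (d : PySem.Dict Int Int) (t : Int) :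
    xs.foldl
      (fun (s : List Int × PySem.Dict Int Int × Int) sublist =>
        let end_pos : Int := s.2.2 + (sublist.length : Int)
        (s.1 ++ sublist, s.2.1.insert s.2.2 end_pos, end_pos))
      (fl, d, t)
      = (fl ++ xs.flatten,
         (pvPairs t (xs.map (fun sub => (sub.length : Int)))).foldl
            (fun d p => d.insert p.1 p.2) d,
         t + ((xs.map (fun sub => (sub.length : Int))).sum)) := by
  induction xs generalizing fl d t with
  | nil => simp [pvPairs]
  | cons x xs ih => simp [pvPairs, ih, List.append_assoc]; ring

theorem ofList_eq_foldl_insert (l : List (Int × Int)) :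
    PySem.Dict.ofList (κ := Int) (ν := Int) l
      = l.foldl (fun d p => d.insert p.1 p.2) PySem.Dict.empty := by
  rfl

-- ===== VERDICT (by name: the statement is the Claim_ definition above) =====
theorem flatten_list_of_lists_spec : Claim_equal_flatten_list_of_lists := by
  intro lol _
  unfold Spec_flatten_list_of_lists flatten_list_of_lists flatten_list_of_lists_alt
  simp only [foldl_A, foldl_ends, List.nil_append]
  simp [ofList_eq_foldl_insert, zip_ends_eq_pairs, List.flatMap_def]
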